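-- pv_equiv track=rewrite | github.com/CenZhihan/LLM4AscendC | tools/eval_operator.py | _extract_core_error
-- ===== SOURCE A (Python) =====
-- def _extract_core_error(text: str) -> str:
--     """
--     Heuristic: pick the last traceback / error-looking lines.
--     Keep it short and high-signal for humans.
--     """
--     if not text:
--         return ""
--     lines = [ln.rstrip() for ln in text.splitlines() if ln.strip()]
--     if not lines:
--         return ""
--
--     key_markers = (
--         "Traceback (most recent call last):",
--         "RuntimeError:",
--         "ImportError:",
--         "ModuleNotFoundError:",
--         "CalledProcessError:",
--         "CMake Error",
--         "error:",
--         "ERROR",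
--         "ERR",
--         "No such file or directory",
--         "not found",
--         "failed",
--     )
--     idxs: list[int] = [i for i, ln in enumerate(lines) if any(m in ln for m in key_markers)]
--     if not idxs:
--         return "\n".join(lines[-20:])
--     start = max(0, idxs[-1] - 6)
--     end = min(len(lines), idxs[-1] + 8)
--     return "\n".join(lines[start:end])
-- ===== SOURCE B (Python) =====
-- def _extract_core_error(text: str) -> str:
--     """
--     Heuristic: pick the last traceback / error-looking lines.
--     Reverse scan with early exit instead of collecting all matching indices.
--     """
--     if not text:
--         return ""
--     lines = [ln.rstrip() for ln in text.splitlines() if ln.strip()]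
--     if not lines:
--         return ""
--
--     key_markers = (
--         "Traceback (most recent call last):",
--         "RuntimeError:",
--         "ImportError:",
--         "ModuleNotFoundError:",
--         "CalledProcessError:",
--         "CMake Error",
--         "error:",
--         "ERROR",
--         "ERR",
--         "No such file or directory",
--         "not found",
--         "failed",
--     )
--     n = len(lines)
--     for k, ln in enumerate(reversed(lines)):
--         if any(m in ln for m in key_markers):
--             last = n - 1 - k
--             return "\n".join(lines[max(0, last - 6):min(n, last + 8)])
--     return "\n".join(lines[-20:])
-- ===== Notes on version B (the rewrite author's own statement) =====
-- stated objective: alternative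
-- what changed: Replaces the forward collect-all-matching-indices list comprehension (then take idxs[-1]) with a single reverse scan over the normalized lines that exits early at the first (i.e. last) marker-containing line.
import Mathlib
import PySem

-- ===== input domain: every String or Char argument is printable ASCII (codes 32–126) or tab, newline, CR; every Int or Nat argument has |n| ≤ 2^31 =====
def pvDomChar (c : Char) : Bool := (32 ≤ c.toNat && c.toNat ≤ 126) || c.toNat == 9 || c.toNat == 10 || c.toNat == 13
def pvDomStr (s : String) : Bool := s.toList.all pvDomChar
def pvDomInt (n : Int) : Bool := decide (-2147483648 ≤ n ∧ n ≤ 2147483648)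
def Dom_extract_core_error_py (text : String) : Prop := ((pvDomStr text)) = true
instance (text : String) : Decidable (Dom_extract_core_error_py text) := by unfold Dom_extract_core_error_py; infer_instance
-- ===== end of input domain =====

-- B does the same normalization and windowing, but finds the last marker line by an
-- early-exit reverse scan instead of collecting every matching index and taking the last.

-- shared constant tuple of markers (identical in A and B)
def pvMarkers : List String :=
  ["Traceback (most recent call last):", "RuntimeError:", "ImportError:",
   "ModuleNotFoundError:", "CalledProcessError:", "CMake Error", "error:",
   "ERROR", "ERR", "No such file or directory", "not found", "failed"]

-- line-matching predicate: any(m in ln for m in key_markers)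
def pvHit (ln : String) : Bool := pvMarkers.any (fun m => PySem.Str.isIn m ln)

-- normalization: [ln.rstrip() for ln in text.splitlines() if ln.strip()]
def pvLines (text : String) : List String :=
  ((PySem.Str.splitlines text).filter (fun ln => PySem.Str.strip ln ≠ "")).map PySem.Str.rstrip

-- ===== PORT A =====
-- window selection of A: collect ALL matching indices forward, take idxs[-1]
def pvACore (lines : List String) : String :=
  let idxs : List Int := ((PySem.List.enumerate lines).filter (fun q => pvHit q.2)).map (·.1)
  if idxs = [] then PySem.Str.join "\n" (PySem.List.slice lines (some (-20)) none)
  else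
    let last := idxs.getLast!   -- idxs[-1], idxs nonempty here
    PySem.Str.join "\n" (PySem.List.slice lines
      (some (max 0 (last - 6))) (some (min (lines.length : Int) (last + 8))))

def extract_core_error_py (text : String) : String :=
  if text = "" then ""
  else
    let lines := pvLines text
    if lines = [] then "" else pvACore lines

-- ===== PORT B =====
-- window selection of B: early-exit scan over reversed(lines) for the first marker line
def pvBCore (lines : List String) : String :=
  let n : Int := lines.length
  match lines.reverse.findIdx? pvHit with
  | some k =>
      let last : Int := n - 1 - (k : Int)
      PySem.Str.join "\n" (PySem.List.slice lines
        (some (max 0 (last - 6))) (some (min n (last + 8))))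
  | none => PySem.Str.join "\n" (PySem.List.slice lines (some (-20)) none)

def extract_core_error_py_alt (text : String) : String :=
  if text = "" then ""
  else
    let lines := pvLines text
    if lines = [] then "" else pvBCore lines

-- ===== PRECONDITION & SPEC =====
def Spec_extract_core_error_py (text : String) (out : String) : Prop := out = extract_core_error_py_alt text
instance (text : String) (out : String) : Decidable (Spec_extract_core_error_py text out) := by unfold Spec_extract_core_error_py; infer_instance

-- ===== CLAIM (what is proved, stated in full; the proofs are below) =====
def Claim_equal_extract_core_error_py : Prop := ∀ (text : String), Dom_extract_core_error_py text → Spec_extract_core_error_py text (extract_core_error_py text)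

-- ===== LEMMAS AND PROOFS =====

-- enumerate distributes over append
theorem pv_enumerate_append {α : Type} (xs ys : List α) (s : Int) :
    PySem.List.enumerate (xs ++ ys) s
      = PySem.List.enumerate xs s ++ PySem.List.enumerate ys (s + xs.length) := by
  induction xs generalizing s with
  | nil => simp [PySem.List.enumerate_nil]
  | cons x xs ih =>
      simp only [List.cons_append, PySem.List.enumerate_cons, ih (s + 1),
        List.length_cons, List.cons.injEq, true_and]
      congr 2
      push_cast
      ring


-- the last forward-collected matching index equals length - 1 - (first match in reverse)
theorem pv_key {α : Type} (p : α → Bool) (xs : List α) :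
    (((PySem.List.enumerate xs).filter (fun q => p q.2)).map (·.1)).getLast?
      = (xs.reverse.findIdx? p).map (fun k => (xs.length : Int) - 1 - (k : Int)) := by
  induction xs using List.reverseRecOn with
  | nil => simp [PySem.List.enumerate_nil]
  | append_singleton xs x ih =>
      rw [pv_enumerate_append]
      simp only [List.reverse_append, List.reverse_singleton, List.singleton_append,
        List.findIdx?_cons, List.filter_append, List.map_append]
      by_cases hx : p x = true
      · simp [PySem.List.enumerate_cons, PySem.List.enumerate_nil, hx]
      · simp only [Bool.not_eq_true] at hx
        simp only [PySem.List.enumerate_cons, PySem.List.enumerate_nil, hx,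
          List.filter_cons, List.filter_nil]
        simp only [Bool.false_eq_true, if_false, List.map_nil,
          List.append_nil, ih]
        cases h : xs.reverse.findIdx? p with
        | none => simp
        | some k =>
            simp only [Option.bind_eq_bind, Option.bind_some, Option.pure_def,
              Option.map_some, Option.some.injEq, List.length_append,
              List.length_cons, List.length_nil]
            push_cast
            ring

theorem pv_core_eq (lines : List String) : pvACore lines = pvBCore lines := by
  unfold pvACore pvBCore
  have key := pv_key pvHit lines
  cases hf : lines.reverse.findIdx? pvHit with
  | none =>
      rw [hf] at key
      have hempty : (((PySem.List.enumerate lines).filter (fun q => pvHit q.2)).map (·.1)) = [] :=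
        List.getLast?_eq_none_iff.mp (by simpa using key)
      simp [hempty]
  | some k =>
      rw [hf] at key
      have hne : (((PySem.List.enumerate lines).filter (fun q => pvHit q.2)).map (·.1)) ≠ [] := by
        intro hnil
        rw [hnil] at key
        simp at key
      have hlast : (((PySem.List.enumerate lines).filter (fun q => pvHit q.2)).map (·.1)).getLast!
          = (lines.length : Int) - 1 - (k : Int) := by
        rw [List.getLast!_eq_getLast?_getD, key]
        rfl
      simp only [hne, if_false, hlast]

theorem extract_core_error_py_eq (text : String) :
    extract_core_error_py text = extract_core_error_py_alt text := by
  unfold extract_core_error_py extract_core_error_py_alt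
  by_cases h0 : text = ""
  · simp [h0]
  · by_cases h1 : pvLines text = []
    · simp [h0, h1]
    · simp [h0, h1, pv_core_eq]

-- ===== VERDICT (by name: the statement is the Claim_ definition above) =====
theorem extract_core_error_py_spec : Claim_equal_extract_core_error_py := by
  intro text _
  unfold Spec_extract_core_error_py
  exact extract_core_error_py_eq text
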